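-- pv_equiv track=rewrite | github.com/MeeralElborolosy/FrontendCompilerGenerator | ph2.py | rep
-- ===== SOURCE A (Python) =====
-- def checkForIndirect(gramA, a, ai):
--     if ai not in gramA:
--         return False
--     if a == ai:
--         return True
--     for i in gramA[ai]:
--         if i[0] == ai:
--             return False
--         if i[0] in gramA:
--             return checkForIndirect(gramA, a, i[0])
--     return False
--
-- def rep(gramA, A):
--     temp = gramA[A]
--     newTemp = []
--     for i in temp:
--         if checkForIndirect(gramA, A, i[0]):
--             t = []
--             for k in gramA[i[0]]:
--                 t=[]
--                 t+=k
--                 t+=i[1:]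
--                 newTemp.append(t)
--         else:
--             newTemp.append(i)
--     gramA[A] = newTemp
--     return gramA
-- ===== SOURCE B (Python) =====
-- def checkForIndirect(gramA, a, ai):
--     # iterative version of the tail-recursive chain walk
--     while True:
--         if ai not in gramA:
--             return False
--         if a == ai:
--             return True
--         nxt = None
--         for i in gramA[ai]:
--             if i[0] == ai:
--                 return False
--             if i[0] in gramA:
--                 nxt = i[0]
--                 break
--         if nxt is None:
--             return False
--         ai = nxt
--
-- def rep(gramA, A):
--     gramA[A] = [rule
--                 for i in gramA[A]
--                 for rule in ([k + i[1:] for k in gramA[i[0]]]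
--                              if checkForIndirect(gramA, A, i[0]) else [i])]
--     return gramA
-- ===== Notes on version B (the rewrite author's own statement) =====
-- stated objective: alternative
-- what changed: checkForIndirect's tail recursion along the chain of rule heads is replaced by an explicit while-loop whose inner scan yields a 'step to this key' directive, and rep's two-branch append loop is replaced by a single comprehension (flatMap).
import Mathlib
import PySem

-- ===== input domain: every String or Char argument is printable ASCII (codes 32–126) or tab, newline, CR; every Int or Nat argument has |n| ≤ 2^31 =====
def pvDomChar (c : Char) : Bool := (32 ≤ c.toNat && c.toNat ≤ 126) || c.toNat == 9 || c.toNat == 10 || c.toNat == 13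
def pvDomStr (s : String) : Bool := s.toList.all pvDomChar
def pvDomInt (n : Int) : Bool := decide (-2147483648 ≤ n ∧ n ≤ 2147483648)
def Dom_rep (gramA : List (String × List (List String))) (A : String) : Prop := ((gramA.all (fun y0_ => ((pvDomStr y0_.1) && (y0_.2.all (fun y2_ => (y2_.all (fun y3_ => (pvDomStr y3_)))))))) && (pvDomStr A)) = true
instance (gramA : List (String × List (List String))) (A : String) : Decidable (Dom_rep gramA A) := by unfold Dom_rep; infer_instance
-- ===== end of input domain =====

-- B rewrites the tail-recursive chain walk checkForIndirect as an explicit loop and builds the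
-- new rule list with a comprehension (flatMap) instead of a two-branch append loop; same cost.
-- Both A and B mutate gramA[A] in place in Python (the same mutation); the theorems are about
-- the returned value, which for both equals the mutated dict.

-- ===== PORT A =====
-- Python's recursion diverges (RecursionError) on a cyclic head-chain; the port carries fuel
-- gramA.length + 1, which Pre_rep guarantees is enough. A rule `i` with `i = []` would make
-- `i[0]` raise IndexError in Python; the port returns `false` / keeps the rule there (Pre_rep
-- excludes exactly such inputs).
mutual
  -- `checkForIndirect(gramA, a, ai)`
  def checkA (fuel : Nat) (g : PySem.Dict String (List (List String))) (a ai : String) : Bool :=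
    match fuel with
    | 0 => false
    | n + 1 =>
      match g.get? ai with
      | none => false        -- `if ai not in gramA: return False`
      | some rules =>
        if a = ai then true  -- `if a == ai: return True`
        else scanA n g a ai rules
  termination_by (fuel, 0)
  -- the `for i in gramA[ai]` loop of checkForIndirect
  def scanA (n : Nat) (g : PySem.Dict String (List (List String))) (a ai : String)
      (rs : List (List String)) : Bool :=
    match rs with
    | [] => false
    | r :: rs =>
      match r.head? with
      | none => false        -- `i[0]` raises IndexError (excluded by Pre_rep)
      | some h =>
        if h = ai then false                                    -- `if i[0] == ai: return False`
        else if (g.get? h).isSome then checkA n g a h           -- `return checkForIndirect(...)`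
        else scanA n g a ai rs
  termination_by (n, rs.length + 1)
end

def rep (gramA : List (String × List (List String))) (A : String) : List (String × List (List String)) :=
  let g := PySem.Dict.mk gramA
  let temp := (g.get? A).getD []               -- `temp = gramA[A]` (KeyError excluded by Pre_rep)
  let newTemp := temp.foldl (fun newTemp i =>
    match i.head? with
    | none => newTemp ++ [i]                   -- `i[0]` raises IndexError (excluded by Pre_rep)
    | some h =>
      if checkA (gramA.length + 1) g A h then
        -- `for k in gramA[i[0]]: t = []; t += k; t += i[1:]; newTemp.append(t)`
        ((g.get? h).getD []).foldl (fun nt k => nt ++ [k ++ i.drop 1]) newTemp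
      else newTemp ++ [i]) []                  -- `newTemp.append(i)`
  (g.insert A newTemp).items                   -- `gramA[A] = newTemp; return gramA`

-- ===== PORT B =====
-- `checkForIndirect` of Source B: a `while True` loop; each iteration either returns or steps `ai`.
-- The inner `for` of one iteration: returns `none` for "return False" (first head equals ai, or
-- no rule with a head in gramA), `some h` to continue the loop with `ai = h`.
def scanB (g : PySem.Dict String (List (List String))) (ai : String) :
    List (List String) → Option String
  | [] => none                                 -- fall through with `nxt is None`
  | r :: rs =>
    match r.head? with
    | none => none                             -- `i[0]` raises IndexError (excluded by Pre_rep)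
    | some h =>
      if h = ai then none                      -- `if i[0] == ai: return False`
      else if (g.get? h).isSome then some h    -- `nxt = i[0]; break`
      else scanB g ai rs

def checkB (fuel : Nat) (g : PySem.Dict String (List (List String))) (a ai : String) : Bool :=
  match fuel with
  | 0 => false
  | n + 1 =>
    match g.get? ai with
    | none => false
    | some rules =>
      if a = ai then true
      else
        match scanB g ai rules with
        | none => false
        | some h => checkB n g a h             -- `ai = nxt` and loop again

def rep_alt (gramA : List (String × List (List String))) (A : String) : List (String × List (List String)) :=
  let g := PySem.Dict.mk gramA
  let newRules := ((g.get? A).getD []).flatMap (fun i =>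
    match i.head? with
    | none => [i]                              -- `i[0]` raises IndexError (excluded by Pre_rep)
    | some h =>
      if checkB (gramA.length + 1) g A h then
        ((g.get? h).getD []).map (fun k => k ++ i.drop 1)
      else [i])
  (g.insert A newRules).items

-- ===== PRECONDITION & SPEC =====
-- State of the chain walk checkForIndirect performs, read off the INPUT grammar:
-- `.err` = Python raised IndexError on an empty rule, `.done` = it returned normally,
-- `.at ai` = the walk is at key ai.  `.err` and `.done` are absorbing.
inductive PvSt where
  | err  : PvSt
  | done : PvSt
  | at_  : String → PvSt
deriving DecidableEq, Repr

def pvScanSt (g : PySem.Dict String (List (List String))) (ai : String) :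
    List (List String) → PvSt
  | [] => PvSt.done
  | r :: rs =>
    match r.head? with
    | none => PvSt.err                          -- empty rule scanned: `i[0]` raises
    | some h =>
      if h = ai then PvSt.done
      else if (g.get? h).isSome then PvSt.at_ h
      else pvScanSt g ai rs

def pvStepSt (g : PySem.Dict String (List (List String))) (a : String) : PvSt → PvSt
  | PvSt.err => PvSt.err
  | PvSt.done => PvSt.done
  | PvSt.at_ ai =>
    if ai = a then PvSt.done
    else
      match g.get? ai with
      | none => PvSt.done
      | some rules => pvScanSt g ai rules

-- pvScanSt/pvStepSt are not a copy of either port: they read the grammar's head-successor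
-- relation (a structural property of the INPUT dict) in order to state exactly which inputs
-- make Python raise; they compute no output of rep, and the equivalence proof never uses them.
-- Pre_rep admits EXACTLY the inputs on which Python's rep returns: A is a key of gramA
-- (else KeyError), every rule of gramA[A] is nonempty (else `i[0]` raises IndexError), and
-- from each such rule's head the chain walk of checkForIndirect reaches a clean stop — it
-- never scans an empty rule (IndexError) and does not cycle (RecursionError).  A terminating
-- walk visits pairwise-distinct keys, so gramA.length + 1 steps always suffice.
def Pre_rep (gramA : List (String × List (List String))) (A : String) : Prop :=
  (((PySem.Dict.mk gramA).get? A).isSome = true) ∧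
  (∀ i ∈ ((PySem.Dict.mk gramA).get? A).getD [], i ≠ [] ∧
    (pvStepSt (PySem.Dict.mk gramA) A)^[gramA.length + 1] (PvSt.at_ (i.headD "")) = PvSt.done)
instance (gramA : List (String × List (List String))) (A : String) : Decidable (Pre_rep gramA A) := by unfold Pre_rep; infer_instance

def pvWitness_rep : (List (String × List (List String))) × String :=
  ([("E", [["T", "+"], ["n"]]), ("T", [["E", "*"], ["m"]])], "E")

def Spec_rep (gramA : List (String × List (List String))) (A : String) (out : List (String × List (List String))) : Prop := out = rep_alt gramA A
instance (gramA : List (String × List (List String))) (A : String) (out : List (String × List (List String))) : Decidable (Spec_rep gramA A out) := by unfold Spec_rep; infer_instance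

-- ===== CLAIM (what is proved, stated in full; the proofs are below) =====
def Claim_equal_rep : Prop := ∀ (gramA : List (String × List (List String))) (A : String), Dom_rep gramA A → Pre_rep gramA A → Spec_rep gramA A (rep gramA A)

-- ===== LEMMAS AND PROOFS =====

-- The recursive scan of A equals B's directive scan followed by B's loop continuation.
theorem scanA_eq_scanB (n : Nat) (g : PySem.Dict String (List (List String))) (a ai : String)
    (rs : List (List String))
    (ih : ∀ ai', checkA n g a ai' = checkB n g a ai') :
    scanA n g a ai rs = (match scanB g ai rs with
                         | none => false
                         | some h => checkB n g a h) := by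
  induction rs with
  | nil => rw [scanA.eq_def]; simp [scanB]
  | cons r rs ihr =>
    rw [scanA.eq_def, scanB]
    cases hh : r.head? with
    | none => simp [hh]
    | some h =>
      by_cases h1 : h = ai
      · simp [hh, h1]
      · by_cases h2 : (g.get? h).isSome
        · simp [hh, h1, h2, ih]
        · simp [hh, h1, h2, ihr]

theorem checkA_eq_checkB (fuel : Nat) (g : PySem.Dict String (List (List String)))
    (a ai : String) : checkA fuel g a ai = checkB fuel g a ai := by
  induction fuel generalizing ai with
  | zero => rw [checkA.eq_def, checkB]
  | succ n ih =>
    rw [checkA.eq_def, checkB]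
    cases hg : g.get? ai with
    | none => rfl
    | some rules =>
      by_cases h1 : a = ai
      · simp [h1]
      · simp only [h1, if_false]
        exact scanA_eq_scanB n g a ai rules ih

-- ===== VERDICT (by name: the statement is the Claim_ definition above) =====
theorem rep_spec : Claim_equal_rep := by
  intro gramA A _ _
  unfold Spec_rep rep rep_alt
  simp only [checkA_eq_checkB]
  congr 2
  have hbody : ∀ (acc : List (List String)) (i : List String),
      (match i.head? with
       | none => acc ++ [i]
       | some h =>
         if checkB (gramA.length + 1) (PySem.Dict.mk gramA) A h then
           (((PySem.Dict.mk gramA).get? h).getD []).foldl (fun nt k => nt ++ [k ++ i.drop 1]) acc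
         else acc ++ [i]) =
      acc ++ (match i.head? with
       | none => [i]
       | some h =>
         if checkB (gramA.length + 1) (PySem.Dict.mk gramA) A h then
           (((PySem.Dict.mk gramA).get? h).getD []).map (fun k => k ++ i.drop 1)
         else [i]) := by
    intro acc i
    cases hi : i.head? with
    | none => simp
    | some h =>
      simp only
      by_cases hc : checkB (gramA.length + 1) (PySem.Dict.mk gramA) A h
      · rw [PySem.List.foldl_append_singleton_eq_map]; simp [hc]
      · simp [hc]
  calc (((PySem.Dict.mk gramA).get? A).getD []).foldl _ [] 
      = (((PySem.Dict.mk gramA).get? A).getD []).foldl (fun acc i =>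
          acc ++ (match i.head? with
           | none => [i]
           | some h =>
             if checkB (gramA.length + 1) (PySem.Dict.mk gramA) A h then
               (((PySem.Dict.mk gramA).get? h).getD []).map (fun k => k ++ i.drop 1)
             else [i])) [] := by
        exact List.foldl_ext _ _ _ (fun acc i _ => hbody acc i)
    _ = _ := by rw [PySem.List.foldl_append_eq_flatMap]; simp
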